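-- pv_equiv track=rewrite | github.com/luna-ortus-cor/CS2040C-CS3230-CS3233 | cf/d&c/1741D.py | solve
-- ===== SOURCE A (Python) =====
-- def solve(arr):
--     if len(arr)==1:return (True,0)
--     (a,b)=solve(arr[:len(arr)//2])
--     (c,d)=solve(arr[len(arr)//2:])
--     if a and c:
--         if min(arr)+len(arr)-1!=max(arr):
--             return (False,-1)
--         else:
--             if min(arr[:len(arr)//2])<min(arr[len(arr)//2:]):
--                 return (True,b+d)
--             else:
--                 return (True,1+b+d)
--     else:
--         return (False,-1)
-- ===== SOURCE B (Python) =====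
-- def solve(arr):
--     # One pass over index ranges: propagate (ok, swaps, min, max) up the recursion,
--     # no slicing and no per-level min()/max() rescans.
--     def rec(lo, hi):
--         if hi - lo == 1:
--             v = arr[lo]
--             return (True, 0, v, v)
--         mid = (lo + hi) // 2
--         a, b, mn1, mx1 = rec(lo, mid)
--         c, d, mn2, mx2 = rec(mid, hi)
--         if not (a and c):
--             return (False, -1, 0, 0)
--         mn = mn1 if mn1 < mn2 else mn2
--         mx = mx1 if mx1 > mx2 else mx2
--         if mn + (hi - lo) - 1 != mx:
--             return (False, -1, 0, 0)
--         if mn1 < mn2: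
--             return (True, b + d, mn, mx)
--         return (True, 1 + b + d, mn, mx)
--     ok, cnt, _, _ = rec(0, len(arr))
--     return (ok, cnt)
-- ===== Notes on version B (the rewrite author's own statement) =====
-- stated objective: faster
-- what changed: Replaces A's slice-and-rescan divide & conquer (each level slices the array and recomputes min()/max() of every segment) by an index-based recursion that propagates (ok, swaps, min, max) up through the return values, removing all slicing and rescanning.
import Mathlib
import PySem

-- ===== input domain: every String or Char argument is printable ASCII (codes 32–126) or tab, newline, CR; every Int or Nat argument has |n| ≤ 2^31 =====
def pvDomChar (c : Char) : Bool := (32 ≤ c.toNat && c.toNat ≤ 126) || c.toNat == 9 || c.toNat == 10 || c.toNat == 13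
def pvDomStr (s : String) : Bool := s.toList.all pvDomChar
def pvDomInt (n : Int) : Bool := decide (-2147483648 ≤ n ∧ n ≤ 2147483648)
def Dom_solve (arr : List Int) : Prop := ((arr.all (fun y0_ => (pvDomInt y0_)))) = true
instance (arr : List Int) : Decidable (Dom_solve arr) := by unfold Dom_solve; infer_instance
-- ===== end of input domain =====

-- B replaces A's slice-and-rescan divide & conquer by an index-based recursion that
-- propagates (ok, swaps, min, max) upward: O(n) instead of O(n log n).

-- ===== PORT A =====
-- fuel = arr.length makes the recursion total; it is never exhausted on the
-- nonempty inputs admitted by Pre_solve (A recurses forever on []).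
def solveA (fuel : Nat) (arr : List Int) : Bool × Int :=
  match fuel with
  | 0 => (false, -1)
  | fuel + 1 =>
    if arr.length == 1 then (true, 0)
    else
      -- len(arr)//2 : both operands are nonnegative, floordiv is exact here
      let h : Int := PySem.Int.floordiv (arr.length : Int) 2
      let ab := solveA fuel (PySem.List.slice arr none (some h))
      let cd := solveA fuel (PySem.List.slice arr (some h) none)
      if ab.1 && cd.1 then
        -- min()/max() are applied to nonempty lists on every reachable call, so .getD 0 is exact
        if ((PySem.List.min? arr (fun y => y)).getD 0) + (arr.length : Int) - 1
            != ((PySem.List.max? arr (fun y => y)).getD 0) then (false, -1)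
        else
          if ((PySem.List.min? (PySem.List.slice arr none (some h)) (fun y => y)).getD 0)
              < ((PySem.List.min? (PySem.List.slice arr (some h) none) (fun y => y)).getD 0) then
            (true, ab.2 + cd.2)
          else (true, 1 + ab.2 + cd.2)
      else (false, -1)

def solve (arr : List Int) : Bool × Int := solveA arr.length arr

-- ===== PORT B =====
-- fuel = arr.length, same totality device; indices lo ≤ hi are nonnegative Python ints,
-- so Nat indices and Nat division (lo+hi)//2 are exact; arr[lo] is in range on every
-- reachable call, so pyGetD is exact.
def recB (arr : List Int) (fuel : Nat) (lo hi : Nat) : Bool × Int × Int × Int :=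
  match fuel with
  | 0 => (false, -1, 0, 0)
  | fuel + 1 =>
    if hi - lo == 1 then
      let v := PySem.List.pyGetD arr (lo : Int) 0
      (true, 0, v, v)
    else
      let mid := (lo + hi) / 2
      let r1 := recB arr fuel lo mid
      let r2 := recB arr fuel mid hi
      if !(r1.1 && r2.1) then (false, -1, 0, 0)
      else
        let mn := if r1.2.2.1 < r2.2.2.1 then r1.2.2.1 else r2.2.2.1
        let mx := if r1.2.2.2 > r2.2.2.2 then r1.2.2.2 else r2.2.2.2
        if mn + ((hi : Int) - (lo : Int)) - 1 != mx then (false, -1, 0, 0)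
        else if r1.2.2.1 < r2.2.2.1 then (true, r1.2.1 + r2.2.1, mn, mx)
        else (true, 1 + r1.2.1 + r2.2.1, mn, mx)

def solve_alt (arr : List Int) : Bool × Int :=
  let r := recB arr arr.length 0 arr.length
  (r.1, r.2.1)

-- ===== PRECONDITION & SPEC =====
-- A recurses forever (RecursionError) on the empty list, so Pre_ excludes only [].
def Pre_solve (arr : List Int) : Prop := arr ≠ []
instance (arr : List Int) : Decidable (Pre_solve arr) := by unfold Pre_solve; infer_instance
def pvWitness_solve : List Int := ([3, 1, 2, 4])

def Spec_solve (arr : List Int) (out : Bool × Int) : Prop := out = solve_alt arr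
instance (arr : List Int) (out : Bool × Int) : Decidable (Spec_solve arr out) := by unfold Spec_solve; infer_instance

-- ===== CLAIM (what is proved, stated in full; the proofs are below) =====
def Claim_equal_solve : Prop := ∀ (arr : List Int), Dom_solve arr → Pre_solve arr → Spec_solve arr (solve arr)

-- ===== LEMMAS AND PROOFS =====

theorem foldl_min_min (u : List Int) (a b : Int) :
    u.foldl min (min a b) = min a (u.foldl min b) := by
  induction u generalizing b with
  | nil => rfl
  | cons c u ih => simp only [List.foldl_cons, min_assoc, ih]

theorem foldl_max_max (u : List Int) (a b : Int) :
    u.foldl max (max a b) = max a (u.foldl max b) := by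
  induction u generalizing b with
  | nil => rfl
  | cons c u ih => simp only [List.foldl_cons, max_assoc, ih]

theorem min_getD_append (xs ys : List Int) (hx : xs ≠ []) (hy : ys ≠ []) :
    (PySem.List.min? (xs ++ ys) (fun y => y)).getD 0
      = min ((PySem.List.min? xs (fun y => y)).getD 0) ((PySem.List.min? ys (fun y => y)).getD 0) := by
  obtain ⟨x, t, rfl⟩ := List.exists_cons_of_ne_nil hx
  obtain ⟨y, u, rfl⟩ := List.exists_cons_of_ne_nil hy
  rw [List.cons_append, PySem.List.min?_id_cons, PySem.List.min?_id_cons, PySem.List.min?_id_cons]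
  simp only [Option.getD_some, List.foldl_append, List.foldl_cons]
  rw [← foldl_min_min]

theorem max_getD_append (xs ys : List Int) (hx : xs ≠ []) (hy : ys ≠ []) :
    (PySem.List.max? (xs ++ ys) (fun y => y)).getD 0
      = max ((PySem.List.max? xs (fun y => y)).getD 0) ((PySem.List.max? ys (fun y => y)).getD 0) := by
  obtain ⟨x, t, rfl⟩ := List.exists_cons_of_ne_nil hx
  obtain ⟨y, u, rfl⟩ := List.exists_cons_of_ne_nil hy
  rw [List.cons_append, PySem.List.max?_id_cons, PySem.List.max?_id_cons, PySem.List.max?_id_cons]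
  simp only [Option.getD_some, List.foldl_append, List.foldl_cons]
  rw [← foldl_max_max]

theorem main_lemma (fuel : Nat) :
    ∀ (arr : List Int) (lo hi : Nat), lo < hi → hi ≤ arr.length → hi - lo ≤ fuel →
    solveA fuel ((arr.drop lo).take (hi - lo)) = ((recB arr fuel lo hi).1, (recB arr fuel lo hi).2.1)
    ∧ ((recB arr fuel lo hi).1 = true →
        (recB arr fuel lo hi).2.2.1
          = (PySem.List.min? ((arr.drop lo).take (hi - lo)) (fun y => y)).getD 0
        ∧ (recB arr fuel lo hi).2.2.2
          = (PySem.List.max? ((arr.drop lo).take (hi - lo)) (fun y => y)).getD 0) := by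
  induction fuel with
  | zero => intro arr lo hi h1 h2 h3; omega
  | succ fuel ih =>
    intro arr lo hi hlt hle hfuel
    have hsublen : ((arr.drop lo).take (hi - lo)).length = hi - lo := by
      simp [List.length_take, List.length_drop]; omega
    by_cases hbase : hi - lo = 1
    · -- base case
      have hlo : lo < arr.length := by omega
      have hsub : (arr.drop lo).take (hi - lo) = [arr[lo]] := by
        rw [hbase, List.drop_eq_getElem_cons hlo]; rfl
      have hget : PySem.List.pyGetD arr (lo : Int) 0 = arr[lo] := by
        rw [PySem.List.pyGetD_natCast]; exact List.getD_eq_getElem arr 0 hlo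
      rw [hsub]
      have hb : (hi - lo == 1) = true := by simp [hbase]
      simp [solveA, recB, hb, hget, PySem.List.min?_id_cons, PySem.List.max?_id_cons]
    · -- recursive case
      have h2 : 2 ≤ hi - lo := by omega
      set mid := (lo + hi) / 2 with hmid
      have hm1 : lo < mid := by omega
      have hm2 : mid < hi := by omega
      have hmlo : mid - lo = (hi - lo) / 2 := by omega
      have hsplit : (arr.drop lo).take (hi - lo)
          = (arr.drop lo).take (mid - lo) ++ (arr.drop mid).take (hi - mid) := by
        have h : hi - lo = (mid - lo) + (hi - mid) := by omega
        rw [h, List.take_add, List.drop_drop]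
        have h3 : lo + (mid - lo) = mid := by omega
        rw [h3]
      have hlen1 : ((arr.drop lo).take (mid - lo)).length = mid - lo := by
        simp [List.length_take, List.length_drop]; omega
      have hlen2 : ((arr.drop mid).take (hi - mid)).length = hi - mid := by
        simp [List.length_take, List.length_drop]; omega
      have hne1 : (arr.drop lo).take (mid - lo) ≠ [] := by
        intro h; rw [h] at hlen1; simp at hlen1; omega
      have hne2 : (arr.drop mid).take (hi - mid) ≠ [] := by
        intro h; rw [h] at hlen2; simp at hlen2; omega
      obtain ⟨ihA1, ihB1⟩ := ih arr lo mid hm1 (by omega) (by omega)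
      obtain ⟨ihA2, ihB2⟩ := ih arr mid hi hm2 hle (by omega)
      have hhalf : PySem.Int.floordiv ((((arr.drop lo).take (hi - lo)).length : Nat) : Int) 2
          = ((mid - lo : Nat) : Int) := by
        rw [hsublen, PySem.Int.floordiv_eq_ediv_of_pos (by norm_num)]
        omega
      have hslice1 : PySem.List.slice ((arr.drop lo).take (hi - lo)) none (some ((mid - lo : Nat) : Int))
          = (arr.drop lo).take (mid - lo) := by
        rw [PySem.List.slice_to_natCast, hsplit, List.take_append, hlen1]
        simp
      have hslice2 : PySem.List.slice ((arr.drop lo).take (hi - lo)) (some ((mid - lo : Nat) : Int)) none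
          = (arr.drop mid).take (hi - mid) := by
        rw [PySem.List.slice_from_natCast, hsplit, List.drop_append, hlen1]
        simp
      have hlen_ne : (((arr.drop lo).take (hi - lo)).length == 1) = false := by
        simp [hsublen]; omega
      have hbne : (hi - lo == 1) = false := by simp; omega
      have hA : solveA (fuel + 1) ((arr.drop lo).take (hi - lo))
          = (if (recB arr fuel lo mid).1 && (recB arr fuel mid hi).1 then
              if ((PySem.List.min? ((arr.drop lo).take (hi - lo)) (fun y => y)).getD 0)
                  + (((arr.drop lo).take (hi - lo)).length : Int) - 1
                  != ((PySem.List.max? ((arr.drop lo).take (hi - lo)) (fun y => y)).getD 0) then (false, -1)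
              else
                if ((PySem.List.min? ((arr.drop lo).take (mid - lo)) (fun y => y)).getD 0)
                    < ((PySem.List.min? ((arr.drop mid).take (hi - mid)) (fun y => y)).getD 0) then
                  (true, (recB arr fuel lo mid).2.1 + (recB arr fuel mid hi).2.1)
                else (true, 1 + (recB arr fuel lo mid).2.1 + (recB arr fuel mid hi).2.1)
            else (false, -1)) := by
        conv_lhs => rw [solveA]
        rw [if_neg (by simp [hsublen]; omega)]
        simp only [hhalf, hslice1, hslice2, ihA1, ihA2]
      have hB : recB arr (fuel + 1) lo hi
          = (if !((recB arr fuel lo mid).1 && (recB arr fuel mid hi).1) then ((false : Bool), (-1 : Int), (0 : Int), (0 : Int))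
            else if (if (recB arr fuel lo mid).2.2.1 < (recB arr fuel mid hi).2.2.1 then (recB arr fuel lo mid).2.2.1 else (recB arr fuel mid hi).2.2.1)
                + ((hi : Int) - (lo : Int)) - 1
                != (if (recB arr fuel lo mid).2.2.2 > (recB arr fuel mid hi).2.2.2 then (recB arr fuel lo mid).2.2.2 else (recB arr fuel mid hi).2.2.2) then
              (false, -1, 0, 0)
            else if (recB arr fuel lo mid).2.2.1 < (recB arr fuel mid hi).2.2.1 then
              (true, (recB arr fuel lo mid).2.1 + (recB arr fuel mid hi).2.1,
                (if (recB arr fuel lo mid).2.2.1 < (recB arr fuel mid hi).2.2.1 then (recB arr fuel lo mid).2.2.1 else (recB arr fuel mid hi).2.2.1),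
                (if (recB arr fuel lo mid).2.2.2 > (recB arr fuel mid hi).2.2.2 then (recB arr fuel lo mid).2.2.2 else (recB arr fuel mid hi).2.2.2))
            else
              (true, 1 + (recB arr fuel lo mid).2.1 + (recB arr fuel mid hi).2.1,
                (if (recB arr fuel lo mid).2.2.1 < (recB arr fuel mid hi).2.2.1 then (recB arr fuel lo mid).2.2.1 else (recB arr fuel mid hi).2.2.1),
                (if (recB arr fuel lo mid).2.2.2 > (recB arr fuel mid hi).2.2.2 then (recB arr fuel lo mid).2.2.2 else (recB arr fuel mid hi).2.2.2))) := by
        conv_lhs => rw [recB]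
        rw [if_neg (by simp; omega)]
      rw [hA, hB]
      cases hr1 : (recB arr fuel lo mid).1 with
      | false => simp
      | true =>
      cases hr2 : (recB arr fuel mid hi).1 with
      | false => simp
      | true =>
      obtain ⟨e1, f1⟩ := ihB1 hr1
      obtain ⟨e2, f2⟩ := ihB2 hr2
      simp only [e1, e2, f1, f2, Bool.and_self, Bool.not_true, Bool.false_eq_true, if_false]
      have hmn' : (if (PySem.List.min? ((arr.drop lo).take (mid - lo)) (fun y => y)).getD 0 < (PySem.List.min? ((arr.drop mid).take (hi - mid)) (fun y => y)).getD 0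
            then (PySem.List.min? ((arr.drop lo).take (mid - lo)) (fun y => y)).getD 0
            else (PySem.List.min? ((arr.drop mid).take (hi - mid)) (fun y => y)).getD 0)
          = (PySem.List.min? ((arr.drop lo).take (hi - lo)) (fun y => y)).getD 0 := by
        rw [hsplit, min_getD_append _ _ hne1 hne2, min_def]
        split_ifs <;> omega
      have hmx' : (if (PySem.List.max? ((arr.drop lo).take (mid - lo)) (fun y => y)).getD 0 > (PySem.List.max? ((arr.drop mid).take (hi - mid)) (fun y => y)).getD 0
            then (PySem.List.max? ((arr.drop lo).take (mid - lo)) (fun y => y)).getD 0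
            else (PySem.List.max? ((arr.drop mid).take (hi - mid)) (fun y => y)).getD 0)
          = (PySem.List.max? ((arr.drop lo).take (hi - lo)) (fun y => y)).getD 0 := by
        rw [hsplit, max_getD_append _ _ hne1 hne2, max_def]
        split_ifs <;> omega
      have hcast : ((hi : Int) - (lo : Int)) = (((arr.drop lo).take (hi - lo)).length : Int) := by
        rw [hsublen]; omega
      rw [hmn', hmx', hcast]
      split_ifs <;> simp

-- ===== VERDICT (by name: the statement is the Claim_ definition above) =====
theorem solve_spec : Claim_equal_solve := by
  intro arr _ hpre
  have hlen : 0 < arr.length := List.length_pos_iff.mpr hpre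
  have h := main_lemma arr.length arr 0 arr.length hlen (le_refl _) (by omega)
  unfold Spec_solve solve solve_alt
  simpa using h.1
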